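-- pv_equiv track=rewrite | github.com/FinnMacCumail/mcp-netbox | netbox_mcp/agents/intent_recognition.py | _determine_execution_order
-- ===== SOURCE A (Python) =====
-- from typing import Any, Dict, List, Optional, Tuple
-- from enum import Enum
--
-- class QueryComplexity(Enum):
--     """Query complexity levels"""
--     SIMPLE = "simple"      # Single tool, direct execution
--     MODERATE = "moderate"  # 2-3 tools, some coordination
--     COMPLEX = "complex"    # Multiple tools, complex orchestration
--     UNCLEAR = "unclear"    # Requires clarification
--
-- def _determine_execution_order(tools: List[str], complexity: str) -> List[List[str]]:
--     """Determine optimal execution order for tools"""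
--     if complexity == QueryComplexity.SIMPLE.value:
--         # Execute all tools in parallel
--         return [tools]
--     elif complexity == QueryComplexity.MODERATE.value:
--         # Some sequential, some parallel
--         # Group related tools
--         groups = []
--         current_group = []
--         for tool in tools:
--             if "list" in tool:
--                 current_group.append(tool)
--             else:
--                 if current_group:
--                     groups.append(current_group)
--                     current_group = []
--                 groups.append([tool])
--         if current_group:
--             groups.append(current_group)
--         return groups
--     else:
--         # Complex - mostly sequential
--         return [[tool] for tool in tools]
-- ===== SOURCE B (Python) =====
-- def _determine_execution_order(tools, complexity):
--     if complexity == "simple":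
--         return [tools]
--     if complexity != "moderate":
--         return [[t] for t in tools]
--     # Declarative cut-point formulation: a batch starts at every index whose tool
--     # lacks "list", or whose predecessor lacks "list" (or at index 0); the result
--     # is the list of slices between consecutive cut points.
--     n = len(tools)
--     cuts = [i for i in range(n)
--             if i == 0 or "list" not in tools[i] or "list" not in tools[i - 1]] + [n]
--     return [tools[a:b] for a, b in zip(cuts, cuts[1:])]
-- ===== Notes on version B (the rewrite author's own statement) =====
-- stated objective: alternative
-- what changed: The MODERATE branch's sequential accumulator with flush logic is replaced by a declarative staged computation: first compute the list of batch cut points (an index i is a cut iff i==0 or tools[i] or tools[i-1] lacks 'list') by a local pairwise test, then emit the slices between consecutive cut points.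
import Mathlib
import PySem

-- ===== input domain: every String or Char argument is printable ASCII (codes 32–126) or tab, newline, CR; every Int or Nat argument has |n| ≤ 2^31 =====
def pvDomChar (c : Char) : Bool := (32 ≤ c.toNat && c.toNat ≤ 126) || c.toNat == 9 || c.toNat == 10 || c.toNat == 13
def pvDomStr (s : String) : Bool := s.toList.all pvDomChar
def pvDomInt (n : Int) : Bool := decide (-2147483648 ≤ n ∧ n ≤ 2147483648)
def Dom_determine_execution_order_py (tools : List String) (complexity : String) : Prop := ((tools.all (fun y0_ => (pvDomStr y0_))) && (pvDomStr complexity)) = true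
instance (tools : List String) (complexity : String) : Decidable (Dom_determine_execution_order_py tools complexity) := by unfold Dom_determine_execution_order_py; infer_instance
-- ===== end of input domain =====

-- B replaces A's sequential current_group accumulator (MODERATE branch) by a staged,
-- declarative computation: cut points from a local pairwise test, then slices between them.
-- Same results, same cost (alternative decomposition).

-- ===== PORT A =====
def determine_execution_order_py (tools : List String) (complexity : String) : List (List String) :=
  if complexity = "simple" then
    [tools]
  else if complexity = "moderate" then
    let st := tools.foldl
      (fun (s : List (List String) × List String) tool =>
        if PySem.Str.isIn "list" tool then
          (s.1, s.2 ++ [tool])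
        else if s.2 ≠ [] then
          (s.1 ++ [s.2] ++ [[tool]], [])
        else
          (s.1 ++ [[tool]], []))
      ([], [])
    if st.2 ≠ [] then st.1 ++ [st.2] else st.1
  else
    tools.map (fun tool => [tool])

-- ===== PORT B =====
def pvIsList (t : String) : Bool := PySem.Str.isIn "list" t

-- tools.getD i "" is exact for Python's tools[i]/tools[i-1]: i ranges over range(n) so
-- 0 ≤ i < n, and the i-1 access is only reached (short-circuit ||) when i ≥ 1.
def determine_execution_order_py_alt (tools : List String) (complexity : String) : List (List String) :=
  if complexity = "simple" then
    [tools]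
  else if complexity ≠ "moderate" then
    tools.map (fun t => [t])
  else
    let n := tools.length
    let cuts := ((List.range n).filter (fun i =>
        i == 0 || !pvIsList (tools.getD i "") || !pvIsList (tools.getD (i - 1) ""))) ++ [n]
    ((cuts.zip cuts.tail).map (fun ab =>
      PySem.List.slice tools (some (ab.1 : Int)) (some (ab.2 : Int))))

-- ===== PRECONDITION & SPEC =====
def Spec_determine_execution_order_py (tools : List String) (complexity : String) (out : List (List String)) : Prop := out = determine_execution_order_py_alt tools complexity
instance (tools : List String) (complexity : String) (out : List (List String)) : Decidable (Spec_determine_execution_order_py tools complexity out) := by unfold Spec_determine_execution_order_py; infer_instance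

-- ===== CLAIM (what is proved, stated in full; the proofs are below) =====
def Claim_equal_determine_execution_order_py : Prop := ∀ (tools : List String) (complexity : String), Dom_determine_execution_order_py tools complexity → Spec_determine_execution_order_py tools complexity (determine_execution_order_py tools complexity)

-- ===== LEMMAS AND PROOFS =====

-- proof-only names for A's loop body and its finish step (definitionally the port's lambdas)
def pvStepA (key : String → Bool) (s : List (List String) × List String) (tool : String) :
    List (List String) × List String :=
  if key tool then (s.1, s.2 ++ [tool])
  else if s.2 ≠ [] then (s.1 ++ [s.2] ++ [[tool]], [])
  else (s.1 ++ [[tool]], [])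

def pvFinish (st : List (List String) × List String) : List (List String) :=
  if st.2 ≠ [] then st.1 ++ [st.2] else st.1

-- proof-only recursive characterisation of A's moderate loop (state: current true-run c)
def pvAux (key : String → Bool) : List String → List String → List (List String)
  | c, [] => if c = [] then [] else [c]
  | c, t :: ts =>
      if key t then pvAux key (c ++ [t]) ts
      else if c = [] then [t] :: pvAux key [] ts
      else c :: [t] :: pvAux key [] ts

theorem pv_foldl_aux (key : String → Bool) (ts : List String) :
    ∀ (g : List (List String)) (c : List String),
      pvFinish (ts.foldl (pvStepA key) (g, c)) = g ++ pvAux key c ts := by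
  induction ts with
  | nil =>
      intro g c
      by_cases hc : c = [] <;> simp [pvFinish, pvAux, hc]
  | cons t ts ih =>
      intro g c
      rw [List.foldl_cons]
      by_cases hk : key t
      · rw [show pvStepA key (g, c) t = (g, c ++ [t]) by simp [pvStepA, hk]]
        rw [ih]; simp [pvAux, hk]
      · by_cases hc : c = []
        · rw [show pvStepA key (g, c) t = (g ++ [[t]], []) by simp [pvStepA, hk, hc]]
          rw [ih]; simp [pvAux, hk, hc]
        · rw [show pvStepA key (g, c) t = (g ++ [c] ++ [[t]], []) by simp [pvStepA, hk, hc]]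
          rw [ih]; simp [pvAux, hk, hc]

theorem pv_aux_run (key : String → Bool) (ts : List String) :
    ∀ c : List String, c ≠ [] →
      pvAux key c ts = (c ++ ts.takeWhile key) :: pvAux key [] (ts.dropWhile key) := by
  induction ts with
  | nil => intro c hc; simp [pvAux, hc]
  | cons t ts ih =>
      intro c hc
      by_cases hk : key t
      · have := ih (c ++ [t]) (by simp)
        simp [pvAux, hk, this]
      · simp [pvAux, hk, hc]

-- proof-only names for B's cut-point computation
def pvPred (key : String → Bool) (xs : List String) (i : Nat) : Bool :=
  i == 0 || !key (xs.getD i "") || !key (xs.getD (i - 1) "")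

def pvCuts (key : String → Bool) (xs : List String) : List Nat :=
  (List.range xs.length).filter (pvPred key xs) ++ [xs.length]

def pvOut (key : String → Bool) (xs : List String) : List (List String) :=
  ((pvCuts key xs).zip (pvCuts key xs).tail).map (fun ab => (xs.drop ab.1).take (ab.2 - ab.1))

-- the length of the first batch
def pvR (key : String → Bool) (xs : List String) : Nat :=
  if key (xs.getD 0 "") then (xs.takeWhile key).length else 1

theorem pv_len_tw_le {α : Type} (p : α → Bool) (xs : List α) :
    (xs.takeWhile p).length ≤ xs.length := by
  induction xs with
  | nil => simp
  | cons t ts ih =>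
      by_cases h : p t
      · simp [h]; omega
      · simp [h]

theorem pv_take_takeWhile {α : Type} (p : α → Bool) (xs : List α) :
    xs.take (xs.takeWhile p).length = xs.takeWhile p := by
  induction xs with
  | nil => simp
  | cons t ts ih => by_cases h : p t <;> simp [h, ih]

theorem pv_drop_takeWhile {α : Type} (p : α → Bool) (xs : List α) :
    xs.drop (xs.takeWhile p).length = xs.dropWhile p := by
  induction xs with
  | nil => simp
  | cons t ts ih => by_cases h : p t <;> simp [h, ih]

theorem pv_key_in_run (key : String → Bool) (xs : List String) (i : Nat)
    (h : i < (xs.takeWhile key).length) : key (xs.getD i "") = true := by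
  have h1 : xs[i]? = (xs.takeWhile key)[i]? := by
    rw [show xs[i]? = (xs.take (xs.takeWhile key).length)[i]? from (List.getElem?_take_of_lt h).symm,
        pv_take_takeWhile]
  have hmem : (xs.takeWhile key)[i] ∈ xs.takeWhile key := List.getElem_mem h
  have hkey := List.mem_takeWhile_imp hmem
  rw [List.getD_eq_getElem?_getD, h1, List.getElem?_eq_getElem h]
  simpa using hkey

theorem pv_dropWhile_head (key : String → Bool) (xs : List String)
    (h : xs.dropWhile key ≠ []) : key ((xs.dropWhile key).getD 0 "") = false := by
  induction xs with
  | nil => simp at h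
  | cons t ts ih =>
      by_cases hk : key t
      · rw [List.dropWhile_cons_of_pos hk] at h ⊢; exact ih h
      · simp [List.dropWhile_cons_of_neg hk, Bool.eq_false_iff.mpr hk]

theorem pv_r_pos (key : String → Bool) (xs : List String) (hx : xs ≠ []) : 1 ≤ pvR key xs := by
  unfold pvR
  by_cases hk : key (xs.getD 0 "")
  · rw [if_pos hk]
    cases xs with
    | nil => exact absurd rfl hx
    | cons t ts =>
        have ht : key t = true := by simpa using hk
        simp [ht]
  · rw [if_neg hk]

theorem pv_r_le (key : String → Bool) (xs : List String) (hx : xs ≠ []) :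
    pvR key xs ≤ xs.length := by
  unfold pvR
  by_cases hk : key (xs.getD 0 "")
  · rw [if_pos hk]; exact pv_len_tw_le key xs
  · rw [if_neg hk]
    cases xs with
    | nil => exact absurd rfl hx
    | cons t ts => simp

theorem pv_drop_r (key : String → Bool) (xs : List String) (hx : xs ≠ []) :
    xs.drop (pvR key xs) = if key (xs.getD 0 "") then xs.dropWhile key else xs.tail := by
  unfold pvR
  by_cases hk : key (xs.getD 0 "")
  · rw [if_pos hk, if_pos hk]; exact pv_drop_takeWhile key xs
  · rw [if_neg hk, if_neg hk]
    cases xs with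
    | nil => exact absurd rfl hx
    | cons t ts => simp

theorem pv_take_r (key : String → Bool) (xs : List String) (hx : xs ≠ []) :
    xs.take (pvR key xs) = if key (xs.getD 0 "") then xs.takeWhile key else [xs.getD 0 ""] := by
  unfold pvR
  by_cases hk : key (xs.getD 0 "")
  · rw [if_pos hk, if_pos hk]; exact pv_take_takeWhile key xs
  · rw [if_neg hk, if_neg hk]
    cases xs with
    | nil => exact absurd rfl hx
    | cons t ts => simp

-- inside the first batch (index ≥ 1) there is no cut
theorem pv_pred_in_run (key : String → Bool) (xs : List String) (j : Nat)
    (h : j + 1 < pvR key xs) : pvPred key xs (j + 1) = false := by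
  unfold pvR at h
  by_cases hk : key (xs.getD 0 "")
  · rw [if_pos hk] at h
    have h1 : key (xs.getD (j + 1) "") = true := pv_key_in_run key xs (j + 1) h
    have h2 : key (xs.getD j "") = true := pv_key_in_run key xs j (by omega)
    simp only [List.getD_eq_getElem?_getD] at h1 h2
    simp [pvPred, h1, h2]
  · rw [if_neg hk] at h; omega

-- the cut predicate shifted past the first batch agrees with the one on the remainder
theorem pv_pred_shift (key : String → Bool) (xs : List String) (hx : xs ≠ []) (i : Nat)
    (hi : i < (xs.drop (pvR key xs)).length) :
    pvPred key xs (pvR key xs + i) = pvPred key (xs.drop (pvR key xs)) i := by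
  have hr1 : 1 ≤ pvR key xs := pv_r_pos key xs hx
  cases i with
  | zero =>
      -- both sides are true
      have hrest : pvPred key (xs.drop (pvR key xs)) 0 = true := by simp [pvPred]
      rw [hrest]
      by_cases hk : key (xs.getD 0 "")
      · -- xs[r] is the head of dropWhile, which fails key
        have hd : xs.drop (pvR key xs) = xs.dropWhile key := by
          rw [pv_drop_r key xs hx, if_pos hk]
        have hne : xs.dropWhile key ≠ [] := by
          rw [← hd]; intro hc; rw [hc] at hi; simp at hi
        have hkey := pv_dropWhile_head key xs hne
        have hidx : xs.getD (pvR key xs) "" = (xs.dropWhile key).getD 0 "" := by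
          rw [← hd]
          simp [List.getD_eq_getElem?_getD, List.getElem?_drop]
        simp only [List.getD_eq_getElem?_getD] at hidx hkey
        simp [pvPred, hidx, hkey]
      · -- r = 1 and key xs[0] is false: the third disjunct fires
        have hr : pvR key xs = 1 := by unfold pvR; rw [if_neg hk]
        have hkf : key (xs.getD 0 "") = false := by
          simp only [Bool.not_eq_true] at hk; exact hk
        simp only [List.getD_eq_getElem?_getD] at hkf
        simp [pvPred, hr, hkf]
  | succ j =>
      -- pure index shifting; both first disjuncts are false
      have e1 : xs.getD (pvR key xs + (j + 1)) "" = (xs.drop (pvR key xs)).getD (j + 1) "" := by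
        simp [List.getD_eq_getElem?_getD, List.getElem?_drop]
      have e2 : xs.getD (pvR key xs + (j + 1) - 1) "" = (xs.drop (pvR key xs)).getD (j + 1 - 1) "" := by
        have : pvR key xs + (j + 1) - 1 = pvR key xs + j := by omega
        simp [this, List.getD_eq_getElem?_getD, List.getElem?_drop]
      simp only [pvPred, e1, e2]
      have hne1 : (pvR key xs + (j + 1) == 0) = false := by simp
      have hne2 : ((j + 1 : Nat) == 0) = false := by simp
      rw [hne1, hne2]

theorem pv_cuts_decomp (key : String → Bool) (xs : List String) (hx : xs ≠ []) :
    pvCuts key xs = 0 :: (pvCuts key (xs.drop (pvR key xs))).map (fun c => pvR key xs + c) := by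
  set r := pvR key xs with hrdef
  have hr1 : 1 ≤ r := pv_r_pos key xs hx
  have hrle : r ≤ xs.length := pv_r_le key xs hx
  set m := (xs.drop r).length with hmdef
  have hlen : xs.length = r + m := by
    rw [hmdef, List.length_drop]; omega
  unfold pvCuts
  rw [hlen, List.range_add, List.filter_append]
  -- first part: the filter over range r is [0]
  have hpart1 : (List.range r).filter (pvPred key xs) = [0] := by
    obtain ⟨k, hk⟩ : ∃ k, r = k + 1 := ⟨r - 1, by omega⟩
    rw [hk, List.range_succ_eq_map]
    have h0 : pvPred key xs 0 = true := by simp [pvPred]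
    rw [List.filter_cons_of_pos h0, List.filter_map]
    have : (List.range k).filter (pvPred key xs ∘ Nat.succ) = [] := by
      rw [List.filter_eq_nil_iff]
      intro j hj
      have hjk : j < k := List.mem_range.mp hj
      have := pv_pred_in_run key xs j (by omega)
      simpa using this
    rw [this]; simp
  -- second part: the filter over the shifted range is the shifted filter over the remainder
  have hpart2 : ((List.range m).map (fun x => r + x)).filter (pvPred key xs)
      = ((List.range m).filter (pvPred key (xs.drop r))).map (fun c => r + c) := by
    rw [List.filter_map]
    congr 1
    apply List.filter_congr
    intro i hi
    exact pv_pred_shift key xs hx i (by rw [← hmdef]; exact List.mem_range.mp hi)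
  rw [hpart1, hpart2]
  simp [← hmdef]

-- pvCuts always starts with 0
theorem pv_cuts_head (key : String → Bool) (xs : List String) :
    ∃ tl, pvCuts key xs = 0 :: tl := by
  unfold pvCuts
  cases xs with
  | nil => exact ⟨[], rfl⟩
  | cons t ts =>
      rw [show (t :: ts).length = ts.length + 1 from rfl, List.range_succ_eq_map]
      rw [List.filter_cons_of_pos (by simp [pvPred])]
      exact ⟨_, rfl⟩

theorem pv_out_decomp (key : String → Bool) (xs : List String) (hx : xs ≠ []) :
    pvOut key xs = xs.take (pvR key xs) :: pvOut key (xs.drop (pvR key xs)) := by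
  set r := pvR key xs with hrdef
  obtain ⟨tl, htl⟩ := pv_cuts_head key (xs.drop r)
  unfold pvOut
  rw [pv_cuts_decomp key xs hx, ← hrdef, htl]
  simp only [List.map_cons, List.tail_cons, List.zip_cons_cons, List.map_cons]
  refine congrArg₂ List.cons (by simp) ?_
  -- shifted pairs produce the slices of the remainder
  rw [show ((r + 0) :: List.map (fun c => r + c) tl) = List.map (fun c => r + c) (0 :: tl) from rfl,
      List.zip_map, List.map_map]
  apply List.map_congr_left
  intro ab _
  simp only [Function.comp_apply, Prod.map_fst, Prod.map_snd, List.drop_drop]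
  rw [show r + ab.2 - (r + ab.1) = ab.2 - ab.1 by omega]

theorem pv_out_eq_aux (key : String → Bool) :
    ∀ (n : Nat) (xs : List String), xs.length ≤ n → pvOut key xs = pvAux key [] xs := by
  intro n
  induction n with
  | zero =>
      intro xs hxs
      have : xs = [] := List.length_eq_zero_iff.mp (Nat.le_zero.mp hxs)
      subst this
      simp [pvOut, pvCuts, pvAux]
  | succ n ih =>
      intro xs hxs
      cases hxs' : xs with
      | nil => simp [pvOut, pvCuts, pvAux]
      | cons t ts =>
          subst hxs'
          have hx : t :: ts ≠ [] := by simp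
          have hr1 := pv_r_pos key (t :: ts) hx
          have hrec : ((t :: ts).drop (pvR key (t :: ts))).length ≤ n := by
            rw [List.length_drop]
            simp only [List.length_cons] at hxs ⊢
            omega
          rw [pv_out_decomp key (t :: ts) hx, ih _ hrec]
          by_cases hk : key t
          · have hk0 : key ((t :: ts).getD 0 "") = true := by simpa using hk
            rw [pv_take_r key (t :: ts) hx, if_pos hk0,
                pv_drop_r key (t :: ts) hx, if_pos hk0]
            rw [show (t :: ts).takeWhile key = t :: ts.takeWhile key by simp [hk]]
            rw [show (t :: ts).dropWhile key = ts.dropWhile key by simp [hk]]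
            rw [show pvAux key [] (t :: ts) = pvAux key [t] ts by simp [pvAux, hk]]
            rw [pv_aux_run key ts [t] (by simp)]
            simp
          · have hkt : key t = false := by simpa using hk
            rw [pv_take_r key (t :: ts) hx, if_neg (by simp [hkt]),
                pv_drop_r key (t :: ts) hx, if_neg (by simp [hkt])]
            simp [pvAux, hk]

theorem pv_out_eq (key : String → Bool) (xs : List String) :
    pvOut key xs = pvAux key [] xs :=
  pv_out_eq_aux key xs.length xs le_rfl

-- the moderate branch of port B computes pvOut
theorem pv_alt_moderate (tools : List String) :
    determine_execution_order_py_alt tools "moderate" = pvOut pvIsList tools := by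
  unfold determine_execution_order_py_alt pvOut pvCuts pvPred
  simp only [if_neg (by decide : ¬("moderate" : String) = "simple"), ne_eq, not_true_eq_false,
    if_false]
  apply List.map_congr_left
  intro ab _
  rw [PySem.List.slice_natCast]

-- ===== VERDICT (by name: the statement is the Claim_ definition above) =====
theorem determine_execution_order_py_spec : Claim_equal_determine_execution_order_py := by
  intro tools complexity _
  unfold Spec_determine_execution_order_py
  by_cases h1 : complexity = "simple"
  · simp [determine_execution_order_py, determine_execution_order_py_alt, h1]
  · by_cases h2 : complexity = "moderate"
    · subst h2
      calc determine_execution_order_py tools "moderate"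
          = pvFinish (tools.foldl (pvStepA pvIsList) ([], [])) := rfl
        _ = [] ++ pvAux pvIsList [] tools := pv_foldl_aux pvIsList tools [] []
        _ = pvOut pvIsList tools := by rw [pv_out_eq]; simp
        _ = determine_execution_order_py_alt tools "moderate" := (pv_alt_moderate tools).symm
    · simp [determine_execution_order_py, determine_execution_order_py_alt, h1, h2]
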